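-- pv_equiv track=rewrite | github.com/KennethTBarrett/cs-sprint-challenge-hash-tables | hashtables/ex5/ex5.py | finder
-- ===== SOURCE A (Python) =====
-- def finder(files, queries):
--     """
--     YOUR CODE HERE
--     """
--     cache = {}
--     # For every item in the files, we need to
--     # make our split, and append the item if
--     # in cache.
--     for path in files:
--         # Get final part, set as item, check
--         # if in cache.
--         item = path.split('/')[-1]
--         if item in cache:
--             cache[item].append(path)
--         else:
--             cache[item] = [path]
--     # For every query we have, check if it's in the cache.
--     # If the query exists in our cache, we're going to append
--     # the path of the results of that query of our cache.
--     result = []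
--     for query in queries:
--         if query in cache:
--             results = cache[query]
--             for path in results:
--                 result.append(path)
--     return result
-- ===== SOURCE B (Python) =====
-- def finder(files, queries):
--     result = []
--     for query in queries:
--         for path in files:
--             if path.split('/')[-1] == query:
--                 result.append(path)
--     return result
-- ===== Notes on version B (the rewrite author's own statement) =====
-- stated objective: simpler
-- what changed: Drops the cache dict: instead of grouping paths by basename into a dict and looking queries up, B directly scans files for each query and appends matching paths.
import Mathlib
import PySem

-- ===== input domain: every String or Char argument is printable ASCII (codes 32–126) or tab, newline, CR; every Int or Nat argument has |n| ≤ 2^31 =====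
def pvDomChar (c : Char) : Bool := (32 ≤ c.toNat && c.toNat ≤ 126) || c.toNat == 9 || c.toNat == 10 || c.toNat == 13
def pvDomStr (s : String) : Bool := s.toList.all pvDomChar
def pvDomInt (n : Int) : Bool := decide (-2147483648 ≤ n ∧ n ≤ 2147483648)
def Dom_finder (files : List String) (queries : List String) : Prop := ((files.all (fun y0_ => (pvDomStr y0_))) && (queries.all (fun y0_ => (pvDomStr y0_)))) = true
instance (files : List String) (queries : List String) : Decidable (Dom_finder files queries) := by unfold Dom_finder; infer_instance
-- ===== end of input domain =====

-- B drops the cache dict: for each query it scans files directly and appends matching paths; simpler, no index structure.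


-- ===== PORT A =====
-- path.split('/')[-1]: splitOn never returns [], so the (-1) index always exists; getD "" is exact.
-- sep "/" ≠ "" so split? is always some, and a split is never empty so index -1 exists: both getD defaults are exact
def pvBasename (p : String) : String := (PySem.List.pyGet? ((PySem.Str.split? p "/").getD []) (-1)).getD ""

def finder (files : List String) (queries : List String) : List String :=
  let cache : PySem.Dict String (List String) :=
    files.foldl (fun c path =>
      let item := pvBasename path
      if c.contains item then c.insert item (c.getD item [] ++ [path])
      else c.insert item [path]) PySem.Dict.empty
  queries.foldl (fun result query =>
    if cache.contains query then
      (cache.getD query []).foldl (fun r path => r ++ [path]) result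
    else result) []

-- ===== PORT B =====
def finder_alt (files : List String) (queries : List String) : List String :=
  queries.foldl (fun result query =>
    files.foldl (fun r path => if pvBasename path == query then r ++ [path] else r) result) []

-- ===== PRECONDITION & SPEC =====
def Spec_finder (files : List String) (queries : List String) (out : List String) : Prop := out = finder_alt files queries
instance (files : List String) (queries : List String) (out : List String) : Decidable (Spec_finder files queries out) := by unfold Spec_finder; infer_instance

-- ===== CLAIM (what is proved, stated in full; the proofs are below) =====
def Claim_equal_finder : Prop := ∀ (files : List String) (queries : List String), Dom_finder files queries → Spec_finder files queries (finder files queries)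

-- ===== LEMMAS AND PROOFS =====

-- invariant of A's grouping loop: lookup in the built cache is the filtered file list
lemma cache_getD (files : List String) (c : PySem.Dict String (List String)) (q : String) :
    (files.foldl (fun c path =>
      let item := pvBasename path
      if c.contains item then c.insert item (c.getD item [] ++ [path])
      else c.insert item [path]) c).getD q []
    = c.getD q [] ++ files.filter (fun p => pvBasename p == q) := by
  induction files generalizing c with
  | nil => simp
  | cons p ps ih =>
    simp only [List.foldl_cons, List.filter_cons]
    by_cases hq : pvBasename p = q
    · subst hq
      simp only [beq_self_eq_true, if_pos]
      by_cases hc : c.contains (pvBasename p)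
      · simp [hc, ih, PySem.Dict.getD_insert_self]
      · simp [hc, ih, PySem.Dict.getD_insert_self,
          PySem.Dict.getD_of_not_contains c [] (by simpa using hc)]
    · have hne : q ≠ pvBasename p := fun h => hq h.symm
      by_cases hc : c.contains (pvBasename p) <;>
        simp [hc, ih, PySem.Dict.getD_insert_of_ne _ _ _ hne, hq]

-- membership in the built cache is "some file has this basename"
lemma cache_contains (files : List String) (c : PySem.Dict String (List String)) (q : String) :
    (files.foldl (fun c path =>
      let item := pvBasename path
      if c.contains item then c.insert item (c.getD item [] ++ [path])
      else c.insert item [path]) c).contains q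
    = (c.contains q || files.any (fun p => pvBasename p == q)) := by
  induction files generalizing c with
  | nil => simp
  | cons p ps ih =>
    simp only [List.foldl_cons, List.any_cons]
    by_cases hq : pvBasename p = q
    · subst hq
      by_cases hc : c.contains (pvBasename p) <;>
        simp [hc, ih]
    · have hbq : (pvBasename p == q) = false := by simp [hq]
      have hqb : (q == pvBasename p) = false := beq_eq_false_iff_ne.mpr (fun h => hq h.symm)
      by_cases hc : c.contains (pvBasename p) <;>
        simp [hc, ih, PySem.Dict.contains_insert, hbq, hqb]

-- ===== VERDICT (by name: the statement is the Claim_ definition above) =====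
theorem finder_spec : Claim_equal_finder := by
  intro files queries _
  show finder files queries = finder_alt files queries
  simp only [finder, finder_alt]
  have step : ∀ (res : List String) (q : String),
      (if ((files.foldl (fun c path =>
              let item := pvBasename path
              if c.contains item then c.insert item (c.getD item [] ++ [path])
              else c.insert item [path]) PySem.Dict.empty).contains q) then
        ((files.foldl (fun c path =>
              let item := pvBasename path
              if c.contains item then c.insert item (c.getD item [] ++ [path])
              else c.insert item [path]) PySem.Dict.empty).getD q []).foldl
          (fun r path => r ++ [path]) res
      else res)
      = files.foldl (fun r path => if pvBasename path == q then r ++ [path] else r) res := by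
    intro res q
    rw [show (fun (r : List String) (path : String) => if pvBasename path == q then r ++ [path] else r)
        = (fun r path => if (fun p => pvBasename p == q) path then r ++ [(fun p => p) path] else r) from rfl,
      PySem.List.foldl_append_if, List.map_id_fun', cache_getD, cache_contains]
    simp only [PySem.Dict.getD_empty, PySem.Dict.contains_empty, Bool.false_or, List.nil_append]
    by_cases ha : files.any (fun p => pvBasename p == q)
    · rw [if_pos ha, PySem.List.foldl_append_singleton]
      simp
    · rw [if_neg ha]
      have hnil : List.filter (fun p => pvBasename p == q) files = [] :=
        List.filter_eq_nil_iff.mpr (fun x hx hb => ha (List.any_eq_true.mpr ⟨x, hx, hb⟩))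
      simp [hnil]
  have main : ∀ (qs init : List String),
      qs.foldl (fun result query =>
        if ((files.foldl (fun c path =>
              let item := pvBasename path
              if c.contains item then c.insert item (c.getD item [] ++ [path])
              else c.insert item [path]) PySem.Dict.empty).contains query) then
          ((files.foldl (fun c path =>
              let item := pvBasename path
              if c.contains item then c.insert item (c.getD item [] ++ [path])
              else c.insert item [path]) PySem.Dict.empty).getD query []).foldl
            (fun r path => r ++ [path]) result
        else result) init
      = qs.foldl (fun result query =>
          files.foldl (fun r path => if pvBasename path == query then r ++ [path] else r) result) init := by
    intro qs
    induction qs with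
    | nil => intro init; rfl
    | cons q qs ih =>
      intro init
      simp only [List.foldl_cons]
      rw [step init q]
      exact ih _
  exact main queries []
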